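-- pv_equiv track=rewrite | github.com/ktouchie/advent-of-code | aoc_2024/days/day04_part1.py | check_word_in_direction
-- ===== SOURCE A (Python) =====
-- def check_word_in_direction(row, col, row_delta, col_delta, word, grid):
--     nb_rows = len(grid)
--     nb_cols = len(grid[0])
--     # Check for each letter in the word
--     for i in range(len(word)):
--         new_row = row + i * row_delta
--         new_col = col + i * col_delta
--         if new_row < 0 or new_row >= len(grid):
--             return False
--         # Check that next direction is in the grid
--         if not (0 <= new_row < nb_rows and 0 <= new_col < nb_cols):
--             return False
--         # Check that the next letter is the same as the next letter in the word
--         if grid[new_row][new_col] != word[i]: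
--             return False
--     return True
-- ===== SOURCE B (Python) =====
-- def check_word_in_direction(row, col, row_delta, col_delta, word, grid):
--     nb_rows = len(grid)
--     nb_cols = len(grid[0])
--     n = len(word)
--     if n == 0:
--         return True
--     # positions are linear in i, so if both endpoints lie in the grid every
--     # intermediate position does too: two bound checks instead of n
--     for i in (0, n - 1):
--         r = row + i * row_delta
--         c = col + i * col_delta
--         if not (0 <= r < nb_rows and 0 <= c < nb_cols):
--             return False
--     path = ''.join(grid[row + i * row_delta][col + i * col_delta] for i in range(n))
--     return path == word
-- ===== Notes on version B (the rewrite author's own statement) =====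
-- stated objective: alternative
-- what changed: A tests bounds and compares one character per step with an early exit; B checks bounds only at the two endpoints of the walk (positions are linear in i, so interval bounds are convex), then collects the whole path string and decides the match with a single string equality.
-- outside the precondition, e.g. on check_word_in_direction(0, 1, 1, 0, 'abc', ['xy', 'z', 'ab']): A returns False, B raises IndexError; on check_word_in_direction(0, 0, 0, 0, 'a', []): A raises IndexError, B raises IndexError
import Mathlib
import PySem

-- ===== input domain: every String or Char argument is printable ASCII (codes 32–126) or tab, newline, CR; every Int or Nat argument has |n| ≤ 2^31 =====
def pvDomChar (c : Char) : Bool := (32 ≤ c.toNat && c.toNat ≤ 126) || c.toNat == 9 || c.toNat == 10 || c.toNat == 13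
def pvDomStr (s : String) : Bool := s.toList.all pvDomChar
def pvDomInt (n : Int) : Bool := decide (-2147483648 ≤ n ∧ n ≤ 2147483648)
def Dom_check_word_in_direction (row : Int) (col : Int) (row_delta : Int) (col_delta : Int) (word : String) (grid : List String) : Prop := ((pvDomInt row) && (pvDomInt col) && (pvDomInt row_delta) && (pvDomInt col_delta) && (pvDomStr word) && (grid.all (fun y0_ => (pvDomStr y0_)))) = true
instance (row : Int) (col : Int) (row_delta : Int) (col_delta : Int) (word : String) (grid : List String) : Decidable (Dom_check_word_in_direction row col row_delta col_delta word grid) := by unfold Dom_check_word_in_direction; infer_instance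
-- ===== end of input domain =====

-- B replaces A's per-step bound test and per-character early exit by two endpoint
-- bound checks (the walked positions are linear in i, so the interval bounds are
-- convex) followed by one whole-string comparison of the collected path with word.

-- ===== PORT A =====
-- the loop body of A, recursing over the remaining indices of range(len(word));
-- the 'none' cases are IndexError in Python (excluded by Pre_)
def aLoop (row col row_delta col_delta : Int) (w : List Char) (grid : List String)
    (nbRows nbCols : Int) : List Nat → Bool
  | [] => true
  | i :: rest =>
    let new_row := row + (i : Int) * row_delta
    let new_col := col + (i : Int) * col_delta
    if new_row < 0 ∨ new_row ≥ (grid.length : Int) then false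
    else if ¬ (0 ≤ new_row ∧ new_row < nbRows ∧ 0 ≤ new_col ∧ new_col < nbCols) then false
    else
      match (PySem.List.pyGet? grid new_row).bind (fun s => PySem.Str.pyGet? s new_col),
            PySem.List.pyGet? w (i : Int) with
      | some c, some wc =>
          if c ≠ wc then false
          else aLoop row col row_delta col_delta w grid nbRows nbCols rest
      | _, _ => false

def check_word_in_direction (row : Int) (col : Int) (row_delta : Int) (col_delta : Int) (word : String) (grid : List String) : Bool :=
  match PySem.List.pyGet? grid 0 with
  | none => false  -- len(grid[0]) raises IndexError on [] (excluded by Pre_)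
  | some g0 =>
    let nbRows : Int := grid.length
    let nbCols : Int := g0.toList.length
    aLoop row col row_delta col_delta word.toList grid nbRows nbCols
      (List.range word.toList.length)

-- ===== PORT B =====
def check_word_in_direction_alt (row : Int) (col : Int) (row_delta : Int) (col_delta : Int) (word : String) (grid : List String) : Bool :=
  match PySem.List.pyGet? grid 0 with
  | none => false  -- len(grid[0]) raises IndexError on [] (excluded by Pre_)
  | some g0 =>
    let nbRows : Int := grid.length
    let nbCols : Int := g0.toList.length
    let w := word.toList
    let n := w.length
    if n = 0 then true
    else if [0, n - 1].all (fun i =>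
        decide (0 ≤ row + (i : Int) * row_delta ∧ row + (i : Int) * row_delta < nbRows ∧
                0 ≤ col + (i : Int) * col_delta ∧ col + (i : Int) * col_delta < nbCols)) then
      -- the generator grid[r][c]: exact here because both indices were bound-checked
      -- (and Pre_ rules out a ragged short row); '.getD' never fires on its default
      let path := (List.range n).map (fun (i : Nat) =>
        ((PySem.List.pyGet? grid (row + (i : Int) * row_delta)).bind
          (fun s => PySem.Str.pyGet? s (col + (i : Int) * col_delta))).getD ' ')
      decide (path = w)
    else false

-- ===== PRECONDITION & SPEC =====
-- Pre_ excludes the empty grid (A raises IndexError on len(grid[0])) and ragged grids on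
-- which the scan reaches an in-bound cell beyond its shorter-than-first row: there A raises
-- IndexError, or returns False when an earlier character mismatch stops it, while B —
-- which collects the whole path before comparing — raises IndexError.
def Pre_check_word_in_direction (row : Int) (col : Int) (row_delta : Int) (col_delta : Int) (word : String) (grid : List String) : Prop :=
  grid ≠ [] ∧ ∀ i < word.toList.length,
    (0 ≤ row + (i : Int) * row_delta ∧ row + (i : Int) * row_delta < (grid.length : Int) ∧
     0 ≤ col + (i : Int) * col_delta ∧
     col + (i : Int) * col_delta < ((grid.headD "").toList.length : Int)) →
    col + (i : Int) * col_delta <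
      (((PySem.List.pyGetD grid (row + (i : Int) * row_delta) "").toList.length : Int))
instance (row : Int) (col : Int) (row_delta : Int) (col_delta : Int) (word : String) (grid : List String) : Decidable (Pre_check_word_in_direction row col row_delta col_delta word grid) := by unfold Pre_check_word_in_direction; infer_instance

def pvWitness_check_word_in_direction : Int × Int × Int × Int × String × List String :=
  (0, 0, 1, 1, "XMAS", ["XOOO", "OMOO", "OOAO", "OOOS"])

def Spec_check_word_in_direction (row : Int) (col : Int) (row_delta : Int) (col_delta : Int) (word : String) (grid : List String) (out : Bool) : Prop := out = check_word_in_direction_alt row col row_delta col_delta word grid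
instance (row : Int) (col : Int) (row_delta : Int) (col_delta : Int) (word : String) (grid : List String) (out : Bool) : Decidable (Spec_check_word_in_direction row col row_delta col_delta word grid out) := by unfold Spec_check_word_in_direction; infer_instance

-- ===== CLAIM (what is proved, stated in full; the proofs are below) =====
def Claim_equal_check_word_in_direction : Prop := ∀ (row : Int) (col : Int) (row_delta : Int) (col_delta : Int) (word : String) (grid : List String), Dom_check_word_in_direction row col row_delta col_delta word grid → Pre_check_word_in_direction row col row_delta col_delta word grid → Spec_check_word_in_direction row col row_delta col_delta word grid (check_word_in_direction row col row_delta col_delta word grid)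

-- ===== LEMMAS AND PROOFS =====

-- the Bool computed by A's character test at step i (grid/word indexing as in aLoop)
def pvChr (row col row_delta col_delta : Int) (w : List Char) (grid : List String) (i : Nat) : Bool :=
  match (PySem.List.pyGet? grid (row + (i : Int) * row_delta)).bind
          (fun s => PySem.Str.pyGet? s (col + (i : Int) * col_delta)),
        PySem.List.pyGet? w (i : Int) with
  | some c, some wc => c == wc
  | _, _ => false

-- the Bool computed by the bound test at step i (with nbRows = grid.length)
def pvBnd (row col row_delta col_delta : Int) (grid : List String) (nbCols : Int) (i : Nat) : Bool :=
  decide (0 ≤ row + (i : Int) * row_delta ∧ row + (i : Int) * row_delta < (grid.length : Int) ∧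
          0 ≤ col + (i : Int) * col_delta ∧ col + (i : Int) * col_delta < nbCols)

theorem aLoop_eq_all (row col row_delta col_delta : Int) (w : List Char) (grid : List String)
    (nbCols : Int) (l : List Nat) :
    aLoop row col row_delta col_delta w grid (grid.length : Int) nbCols l =
      l.all (fun i => pvBnd row col row_delta col_delta grid nbCols i &&
                      pvChr row col row_delta col_delta w grid i) := by
  induction l with
  | nil => rfl
  | cons i rest ih =>
    simp only [aLoop, List.all_cons]
    by_cases h1 : row + (i : Int) * row_delta < 0 ∨
        row + (i : Int) * row_delta ≥ (grid.length : Int)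
    · rw [if_pos h1]
      have hb : pvBnd row col row_delta col_delta grid nbCols i = false := by
        simp only [pvBnd, decide_eq_false_iff_not]; omega
      simp [hb]
    · rw [if_neg h1]
      by_cases h2 : 0 ≤ row + (i : Int) * row_delta ∧
          row + (i : Int) * row_delta < (grid.length : Int) ∧
          0 ≤ col + (i : Int) * col_delta ∧ col + (i : Int) * col_delta < nbCols
      · rw [if_neg (not_not_intro h2)]
        have hb : pvBnd row col row_delta col_delta grid nbCols i = true := by
          simp only [pvBnd, decide_eq_true_iff]; exact h2
        rw [hb, Bool.true_and, ← ih]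
        have hstep : ∀ (o1 o2 : Option Char) (b : Bool),
            (match o1, o2 with
             | some c, some wc => if c ≠ wc then false else b
             | _, _ => false) =
            ((match o1, o2 with
              | some c, some wc => c == wc
              | _, _ => false) && b) := by
          intro o1 o2 b
          rcases o1 with _ | c
          · rfl
          · rcases o2 with _ | wc
            · rfl
            · by_cases he : c = wc <;> simp [he]
        exact hstep _ _ _
      · rw [if_pos h2]
        have hb : pvBnd row col row_delta col_delta grid nbCols i = false := by
          simp only [pvBnd, decide_eq_false_iff_not]; exact h2
        simp [hb]

-- positions linear in i: bounds at both endpoints give bounds everywhere between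
theorem pvBetween {a R : Int} (d : Int) (n i : Nat) (hi : i ≤ n)
    (h0 : 0 ≤ a ∧ a < R) (hn : 0 ≤ a + (n : Int) * d ∧ a + (n : Int) * d < R) :
    0 ≤ a + (i : Int) * d ∧ a + (i : Int) * d < R := by
  rcases (by omega : 0 ≤ d ∨ d < 0) with hd | hd
  · have h1 : (i : Int) * d ≤ (n : Int) * d :=
      mul_le_mul_of_nonneg_right (by exact_mod_cast hi) hd
    have h2 : 0 ≤ (i : Int) * d := mul_nonneg (by positivity) hd
    omega
  · have h1 : (n : Int) * d ≤ (i : Int) * d :=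
      mul_le_mul_of_nonpos_right (by exact_mod_cast hi) (le_of_lt hd)
    have h2 : (i : Int) * d ≤ 0 := mul_nonpos_of_nonneg_of_nonpos (by positivity) (le_of_lt hd)
    omega

theorem pvMapRangeEq (f : Nat → Char) (w : List Char) :
    ((List.range w.length).map f = w) ↔ ∀ (i : Nat) (h : i < w.length), f i = w[i] := by
  constructor
  · intro h i hi
    have := congrArg (fun l => l[i]?) h
    simpa [List.getElem?_map, List.getElem?_range, hi, List.getElem?_eq_getElem] using this
  · intro h
    apply List.ext_getElem (by simp)
    intro i h1 h2
    simpa [List.getElem_map, List.getElem_range] using h i h2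

-- every in-range index of the scan: each element of the optional-char chain is 'some'
theorem pvVal (row col row_delta col_delta : Int) (g : String) (gs : List String)
    (w : List Char)
    (hrag : ∀ i < w.length,
      (0 ≤ row + (i : Int) * row_delta ∧ row + (i : Int) * row_delta < ((g :: gs).length : Int) ∧
       0 ≤ col + (i : Int) * col_delta ∧
       col + (i : Int) * col_delta < (((g :: gs).headD "").toList.length : Int)) →
      col + (i : Int) * col_delta <
        (((PySem.List.pyGetD (g :: gs) (row + (i : Int) * row_delta) "").toList.length : Int)))
    (i : Nat)
    (hb : 0 ≤ row + (i : Int) * row_delta ∧ row + (i : Int) * row_delta < ((g :: gs).length : Int) ∧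
          0 ≤ col + (i : Int) * col_delta ∧ col + (i : Int) * col_delta < ((g.toList.length : Int)))
    (hi : i < w.length) :
    ∃ c : Char,
      ((PySem.List.pyGet? (g :: gs) (row + (i : Int) * row_delta)).bind
        (fun s => PySem.Str.pyGet? s (col + (i : Int) * col_delta))) = some c := by
  obtain ⟨h1, h2, h3, h4⟩ := hb
  have hrow := hrag i hi ⟨h1, h2, h3, by simpa using h4⟩
  rw [PySem.List.pyGetD_eq_getElem _ _ h1 h2] at hrow
  have hsome : (((PySem.List.pyGet? (g :: gs) (row + (i : Int) * row_delta)).bind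
      (fun s => PySem.Str.pyGet? s (col + (i : Int) * col_delta)))).isSome = true := by
    rw [PySem.List.pyGet?_eq_some_getElem _ h1 h2, Option.bind_some]
    simp only [PySem.Str.pyGet?_eq, PySem.Chars.pyGet?_eq_listPyGet?]
    rw [PySem.List.pyGet?_eq_some_getElem _ h3 (by simpa using hrow)]
    rfl
  exact Option.isSome_iff_exists.mp hsome

-- ===== VERDICT (by name: the statement is the Claim_ definition above) =====
theorem check_word_in_direction_spec : Claim_equal_check_word_in_direction := by
  intro row col rd cd word grid _hdom hpre
  obtain ⟨hne, hrag⟩ := hpre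
  unfold Spec_check_word_in_direction
  cases grid with
  | nil => exact absurd rfl hne
  | cons g gs =>
    simp only [check_word_in_direction, check_word_in_direction_alt,
      PySem.List.pyGet?_zero_cons, aLoop_eq_all]
    split_ifs with h0 hcond
    · simp [h0]
    · -- both endpoint bound checks pass
      simp only [List.all_cons, List.all_nil, Bool.and_true, Bool.and_eq_true,
        decide_eq_true_eq, Nat.cast_zero, zero_mul, add_zero] at hcond
      obtain ⟨⟨a1, a2, a3, a4⟩, b1, b2, b3, b4⟩ := hcond
      have hball : ∀ i, i < word.toList.length →
          (0 ≤ row + (i : Int) * rd ∧ row + (i : Int) * rd < ((g :: gs).length : Int) ∧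
           0 ≤ col + (i : Int) * cd ∧ col + (i : Int) * cd < ((g.toList.length : Int))) := by
        intro i hi
        have hr := pvBetween rd (word.toList.length - 1) i (by omega) ⟨a1, a2⟩ ⟨b1, b2⟩
        have hc := pvBetween cd (word.toList.length - 1) i (by omega) ⟨a3, a4⟩ ⟨b3, b4⟩
        exact ⟨hr.1, hr.2, hc.1, hc.2⟩
      have hBoolExt : ∀ a b : Bool, (a = true ↔ b = true) → a = b := by decide
      apply hBoolExt
      rw [List.all_eq_true, decide_eq_true_eq, pvMapRangeEq]
      constructor
      · intro h i hi
        obtain ⟨c, hc⟩ := pvVal row col rd cd g gs word.toList hrag i (hball i hi) hi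
        have hci := h i (List.mem_range.mpr hi)
        rw [Bool.and_eq_true] at hci
        have hchr := hci.2
        have hwi : PySem.List.pyGet? word.toList ((i : Nat) : Int) = some (word.toList[i]) := by
          simp [List.getElem?_eq_getElem hi]
        simp only [pvChr, hc, hwi, beq_iff_eq] at hchr
        rw [hc]
        simpa using hchr
      · intro h i hi'
        have hi := List.mem_range.mp hi'
        obtain ⟨c, hc⟩ := pvVal row col rd cd g gs word.toList hrag i (hball i hi) hi
        rw [Bool.and_eq_true]
        constructor
        · unfold pvBnd
          rw [decide_eq_true_iff]
          exact hball i hi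
        · have hfi := h i hi
          rw [hc] at hfi
          simp only [Option.getD_some] at hfi
          have hwi : PySem.List.pyGet? word.toList ((i : Nat) : Int) = some (word.toList[i]) := by
            simp [List.getElem?_eq_getElem hi]
          simp only [pvChr, hc, hwi, beq_iff_eq]
          exact hfi
    · -- an endpoint bound check fails
      simp only [List.all_cons, List.all_nil, Bool.and_true, Bool.and_eq_true,
        decide_eq_true_eq, Nat.cast_zero, zero_mul, add_zero] at hcond
      rw [List.all_eq_false]
      rcases not_and_or.mp hcond with hP | hP
      · refine ⟨0, List.mem_range.mpr (by omega), ?_⟩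
        simp only [pvBnd, Bool.and_eq_true, decide_eq_true_eq, Nat.cast_zero, zero_mul,
          add_zero, not_and]
        intro hcontra
        exact absurd hcontra hP
      · refine ⟨word.toList.length - 1, List.mem_range.mpr (by omega), ?_⟩
        simp only [pvBnd, Bool.and_eq_true, decide_eq_true_eq, not_and]
        intro hcontra
        exact absurd hcontra hP
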